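/- GENERATED by mk_final_copies.py from the proof of the farm's unit `stb_vorbis_get_frame_float.1` (farm:stb_vorbis_get_frame_float.1.1: Proof.lean) as the
   re-elaboration sweep compiled it — do not edit. -/
import Asan.CheckWalk
import Vorbis.Spec.Units.stb_vorbis_get_frame_float_1

/- SEGMENT 1 OF stb_vorbis_get_frame_float (entry 1196C0H → `cut1` 119737H), in the farm's format: the proof of the worker of the whole
   function (its `seg1`), with the assertion `AtCut1` and the general lemmas (`gff_*`, `decodeInv_stores`) now in
   Vorbis/Spec/GetFrameFloat.lean. -/
open X86 X86.User Asan Vorbis Vorbis.Spec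

set_option maxRecDepth 4000
set_option maxHeartbeats 4000000

namespace Vorbis.Spec.stb_vorbis_get_frame_float_1

/-- A footprint of three windows is one of five (the contract's: `*channels` and `*output` added). -/
theorem seg1_same_widen {s a h c o : Span} {m m' : Mem} (hs : Mem.SameExcept [s, a, h] m m') :
    Mem.SameExcept [s, a, h, c, o] m m' := by
  apply hs.mono
  intro w hw x h1 h2
  refine ⟨w, ?_, h1, h2⟩
  simp only [List.mem_cons, List.not_mem_nil, or_false] at hw ⊢
  rcases hw with rfl | rfl | rfl
  · exact Or.inl rfl
  · exact Or.inr (Or.inl rfl)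
  · exact Or.inr (Or.inr (Or.inl rfl))

end Vorbis.Spec.stb_vorbis_get_frame_float_1

open Vorbis.Spec.stb_vorbis_get_frame_float_1

/-- **Segment 1**: the prologue (six pushes, `sub rsp, 88H`, two spills, the three frame header words, the three inline shadow
stores: `gff_prologue_inv`), the call of vorbis_decode_packet with its precondition (the shadow layer and the invariant for the
longer frame list: `DecodeInv.carry`; `&len`, `&left`, `&right` live objects of the own frame), and the assertion `AtCut1` at the
return. -/
theorem Vorbis.Spec.Worked.stb_vorbis_get_frame_float_1_ok : Vorbis.Spec.stb_vorbis_get_frame_float_1.Statement := by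
  intro Lay hLay μ hμ u₀ hcode h_vdp others frames len A stored room ysz u ret he hpre
  have he0 := he
  have hpre0 := hpre
  v_entry he
  obtain ⟨hsh, hdi, hpc, hpo, hapart⟩ := hpre
  have hvdp := h_vdp others (((u.reg .rsp).toNat - 152, stb_vorbis_get_frame_float.ownFL) :: frames) len A stored room ysz
  obtain ⟨f, hf⟩ : ∃ f : Nat, (u.reg .rdi).toNat = f := ⟨_, rfl⟩
  rw [hf] at hdi
  rw [hf]
  have hwA := stb_vorbis_get_frame_float.gff_arena_where hdi
  u_walk hcode [hμ.vendor] until [Vorbis.L.stb_vorbis_get_frame_float.cut1] span [Vorbis.L.textLo, Vorbis.L.textHi] side (v_side)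
  · v_inv
  · -- 0x119732: the precondition of vorbis_decode_packet
    have e_rsp : (s_119732.reg .rsp).toNat + 8 = (u.reg .rsp).toNat - 184 := by
      rw [w_rsp]
      u_omega
    have hinv' : ShadowInv others (((u.reg .rsp).toNat - 152, stb_vorbis_get_frame_float.ownFL) :: frames) ((u.reg .rsp).toNat - 184)
        s_119732.mem := by
      rw [w_mem]
      refine ShadowInv.writeLE ?_ _ _ _ (by u_omega) (by u_omega)
      refine stb_vorbis_get_frame_float.gff_prologue_inv hsh.inv ?_ he_align he_room he_top (by omega) (by omega) (by omega)
      unfold Asan.ShadowUntouched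
      u_eqon
    have hs : Mem.SameExcept [⟨(u.reg .rsp).toNat - 192, (u.reg .rsp).toNat⟩, ⟨0xC00000, 0xE00000⟩] u.mem
        s_119732.mem := by
      u_same
    have hk : AllKept (RunBlk A len) u.mem s_119732.mem := stb_vorbis_get_frame_float.gff_allKept_stack_shadow hdi hs (by omega) (by omega)
    have hdi' := hdi.carry hsh.inv hk hinv'
    have c_rdi : s_119732.reg .rdi = u.reg .rdi := w_kept.get .rdi rfl
    have e1 : (u.reg .rsp - 120).toNat = (u.reg .rsp).toNat - 152 + 32 := by u_omega
    have e2 : (u.reg .rsp - 88).toNat = (u.reg .rsp).toNat - 152 + 64 := by u_omega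
    have e3 : (u.reg .rsp - 104).toNat = (u.reg .rsp).toNat - 152 + 48 := by u_omega
    refine ⟨⟨?_, hsh.offText⟩, ?_, ?_, ?_, ?_, ?_⟩
    · rw [e_rsp]
      exact hinv'
    · rw [c_rdi, hf]
      exact hdi'
    · rw [w_rsi, e1]
      exact ⟨stb_vorbis_get_frame_float.gff_frameObj_live others frames _ 32 (Or.inl rfl), by omega, by omega⟩
    · rw [w_rdx, e2]
      exact ⟨stb_vorbis_get_frame_float.gff_frameObj_live others frames _ 64 (Or.inr (Or.inr rfl)), by omega, by omega⟩
    · rw [w_rcx, e3]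
      exact ⟨stb_vorbis_get_frame_float.gff_frameObj_live others frames _ 48 (Or.inr (Or.inl rfl)), by omega, by omega⟩
    · rw [w_rsi, w_rdx, w_rcx, e1, e2, e3]
      simp only [Top.Apart4, Top.RangesApart, List.pairwise_cons, List.mem_cons, List.not_mem_nil, or_false,
        forall_eq_or_imp, forall_eq, List.Pairwise.nil, and_true, false_imp_iff, implies_true]
      omega
  · -- 0x119737 = cut1: the assertion, from the callee's footprint and postcondition
    have w_eq := Vorbis.conv_code_eqOn w_code
    simp only [X86.User.Spec.footprint, vspec, w_rsp_119732, w_rsi_119732, w_rdx_119732, w_rcx_119732] at w_same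
    obtain ⟨hinv1, hdi1, hw3⟩ := w_post
    have c_rdi : s_119732.reg .rdi = u.reg .rdi := w_kept_119732.get .rdi rfl
    rw [c_rdi, hf] at hdi1 hw3
    rw [w_rsi_119732, w_rdx_119732, w_rcx_119732] at hw3
    -- the stack slots at the callee's entry (the reads go through the three shadow stores: their addresses are bounded first)
    have hslots := stb_vorbis_get_frame_float.gff_prologue_slots u.mem (u.reg .rsp) (u.reg .r15) (u.reg .r14) (u.reg .r13) (u.reg .r12) (u.reg .rbp)
      (u.reg .rbx) (u.reg .rsi) (u.reg .rdx) ret he_room he_top he_retAddr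
    unfold stb_vorbis_get_frame_float.gff_prologueMem at hslots
    rw [← w_mem_119732] at hslots
    obtain ⟨hp15, hp14, hp13, hp12, hpbp, hpbx, hpch, hpou, hp0⟩ := hslots
    -- … and through the callee's footprint
    have hs15 : UInt64.ofNat (s_119732r.mem.readLE (u.reg .rsp - 8) 8) = u.reg .r15 := by u_frame hp15
    have hs14 : UInt64.ofNat (s_119732r.mem.readLE (u.reg .rsp - 16) 8) = u.reg .r14 := by u_frame hp14
    have hs13 : UInt64.ofNat (s_119732r.mem.readLE (u.reg .rsp - 24) 8) = u.reg .r13 := by u_frame hp13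
    have hs12 : UInt64.ofNat (s_119732r.mem.readLE (u.reg .rsp - 32) 8) = u.reg .r12 := by u_frame hp12
    have hsbp : UInt64.ofNat (s_119732r.mem.readLE (u.reg .rsp - 40) 8) = u.reg .rbp := by u_frame hpbp
    have hsbx : UInt64.ofNat (s_119732r.mem.readLE (u.reg .rsp - 48) 8) = u.reg .rbx := by u_frame hpbx
    have hsch : UInt64.ofNat (s_119732r.mem.readLE (u.reg .rsp - 176) 8) = u.reg .rsi := by u_frame hpch
    have hsou : UInt64.ofNat (s_119732r.mem.readLE (u.reg .rsp - 168) 8) = u.reg .rdx := by u_frame hpou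
    have hs0 : UInt64.ofNat (s_119732r.mem.readLE (u.reg .rsp) 8) = ret := by u_frame hp0
    -- the footprint so far
    rw [w_mem_119732] at w_same
    have hsame1 : Mem.SameExcept [⟨(u.reg .rsp).toNat - 4240, (u.reg .rsp).toNat⟩, ⟨A.B, A.B + A.L⟩,
        ⟨0xC00000, 0xE00000⟩] u.mem s_119732r.mem := by
      u_same
    have e_top : (s_119732r.reg .rsp).toNat = (u.reg .rsp).toNat - 184 := by
      rw [w_rsp]
      u_omega
    rw [e_top] at hinv1
    have e1 : (u.reg .rsp - 120).toNat = (u.reg .rsp).toNat - 120 := by u_omega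
    have e2 : (u.reg .rsp - 88).toNat = (u.reg .rsp).toNat - 88 := by u_omega
    have e3 : (u.reg .rsp - 104).toNat = (u.reg .rsp).toNat - 104 := by u_omega
    rw [e1, e2, e3] at hw3
    -- the contract's footprint: two more windows (`*channels`, `*output`: not written yet)
    have hsame5 := seg1_same_widen (c := ⟨(u.reg .rsi).toNat, (u.reg .rsi).toNat + 4⟩)
      (o := ⟨(u.reg .rdx).toNat, (u.reg .rdx).toNat + 8⟩) hsame1
    refine ReachVia.done ?_
    have hframe : stb_vorbis_get_frame_float.GFrame others frames len A stored room ysz u₀ u ret f s_119732r :=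
      ⟨he0, hpre0, hf, w_rsp, w_r14, hs15, hs14, hs13, hs12, hsbp, hsbx, hs0, hsame5, w_code, w_inv, hinv1, hdi1⟩
    exact ⟨w_rip, ⟨hframe, w_rbx, hsch, hsou⟩, hw3⟩
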